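-- pv_equiv track=rewrite | github.com/monkey0211/AlgoInPython | Uber_Find Robot.py | findRobot
-- ===== SOURCE A (Python) =====
-- from collections import defaultdict
-- from typing import List
--
-- LEFT = 0
--
-- TOP = 1
--
-- BOTTOM = 2
--
-- RIGHT = 3
--
-- def findRobot(matrix, query) -> List[int]:
--
--     map = defaultdict(lambda: [None] * 4)
--     top = [-1] * len(matrix[0])
--     for i in range(len(matrix)):
--         left = -1 #左边界是-1
--         for j in range(len(matrix[0])):
--             if matrix[i][j] == 'O':
--                 map[(i, j)][LEFT] = abs(j - left)
--                 map[(i, j)][TOP] = abs(i - top[j])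
--
--             if matrix[i][j] == 'X': #如果是blocker更新左边界和top边界
--                 left = j
--                 top[j] = i
--
--     bottom = [len(matrix)] * len(matrix[0])
--
--     for i in range(len(matrix)-1, -1, -1):
--         right = len(matrix[0])
--         for j in range(len(matrix[0])- 1, -1, -1):
--             if matrix[i][j] == 'O':
--                 map[(i, j)][BOTTOM] = abs(i - bottom[j])
--                 map[(i, j)][RIGHT] = abs(j - right)
--
--                 # if map[(i, j)]== query:
--                 #     return [i, j]
--
--             if matrix[i][j] == 'X':
--                 right = j
--                 bottom[j] = i
--
--     for i in range(len(matrix)):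
--         for j in range(len(matrix[0])):
--             if map[(i, j)]== query:
--                 return [i, j]
--
--     return [-1, -1]
-- ===== SOURCE B (Python) =====
-- def findRobot(matrix, query):
--     rows = len(matrix)
--     cols = len(matrix[0])
--     for i in range(rows):
--         for j in range(cols):
--             if matrix[i][j] == 'O':
--                 left = next((j - k for k in range(j - 1, -1, -1) if matrix[i][k] == 'X'), j + 1)
--                 right = next((k - j for k in range(j + 1, cols) if matrix[i][k] == 'X'), cols - j)
--                 up = next((i - k for k in range(i - 1, -1, -1) if matrix[k][j] == 'X'), i + 1)
--                 down = next((k - i for k in range(i + 1, rows) if matrix[k][j] == 'X'), rows - i)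
--                 if [left, up, down, right] == query:
--                     return [i, j]
--     return [-1, -1]
-- ===== Notes on version B (the rewrite author's own statement) =====
-- stated objective: simpler
-- what changed: Replaced the two stateful boundary-tracking passes building a defaultdict plus a third matching pass by a single row-major pass that, per open cell, scans directly in each of the four directions for the nearest blocker and returns the first cell whose distance vector equals the query; only open cells are candidates.
-- intended difference: When query is [None, None, None, None] and the grid has a non-'O' cell, A returns the coordinates of the first such cell (its defaultdict lazily creates a [None]*4 entry for every cell the final scan touches, so blocked/empty cells match), while B returns [-1, -1]; the intended answer is 'no robot cell found', since no open cell ever has that vector. — e.g. on findRobot(["X"], [none, none, none, none]): A returns [0, 0], B returns [-1, -1]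
import Mathlib
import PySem

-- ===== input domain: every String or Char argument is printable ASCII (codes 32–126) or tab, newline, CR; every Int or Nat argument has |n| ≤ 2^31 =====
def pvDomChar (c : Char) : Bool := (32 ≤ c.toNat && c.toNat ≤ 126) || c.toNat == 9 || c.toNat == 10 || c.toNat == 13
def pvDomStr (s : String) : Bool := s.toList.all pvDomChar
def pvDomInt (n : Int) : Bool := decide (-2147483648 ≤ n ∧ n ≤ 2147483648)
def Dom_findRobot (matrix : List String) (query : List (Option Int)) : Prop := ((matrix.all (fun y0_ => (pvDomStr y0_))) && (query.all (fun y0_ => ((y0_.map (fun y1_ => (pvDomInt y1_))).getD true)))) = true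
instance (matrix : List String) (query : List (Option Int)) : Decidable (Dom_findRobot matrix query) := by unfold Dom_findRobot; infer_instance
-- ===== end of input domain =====

-- B replaces A's two stateful boundary-tracking passes over a defaultdict plus a final matching
-- pass by ONE row-major pass that scans the four directions per open cell (simpler: no dict, no
-- boundary arrays, only open cells are candidates); A=B outside D_ (A's defaultdict lets non-'O'
-- cells match an all-None query there), Pre_ excludes A's IndexError.

-- ===== PORT A =====
-- matrix[i][j] (both Pythons index the same way; in range under Pre_)
def fr_at (m : List String) (i j : Int) : Char :=
  PySem.List.pyGetD (PySem.List.pyGetD m i "").toList j ' '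

-- defaultdict default value: [None] * 4
def frDflt : List (Option Int) := [none, none, none, none]

abbrev FRD := PySem.Dict (Int × Int) (List (Option Int))

-- body of A's first (top-left) pass for one cell; state = (map, top, left)
def frP1Cell (m : List String) (i : Int) (st : FRD × List Int × Int) (j : Int) :
    FRD × List Int × Int :=
  let d := if fr_at m i j == 'O' then
      let d := PySem.Dict.modify st.1 (i, j) frDflt
        (fun v => PySem.List.pySetD v 0 (some |j - st.2.2|))
      PySem.Dict.modify d (i, j) frDflt
        (fun v => PySem.List.pySetD v 1 (some |i - PySem.List.pyGetD st.2.1 j 0|))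
    else st.1
  if fr_at m i j == 'X' then (d, PySem.List.pySetD st.2.1 j i, j) else (d, st.2.1, st.2.2)

-- one row of the first pass ('left = -1' then the inner j-loop); state = (map, top)
def frP1Row (m : List String) (C : Int) (st : FRD × List Int) (i : Int) : FRD × List Int :=
  let r := (PySem.List.pyRange 0 C 1).foldl (frP1Cell m i) (st.1, st.2, -1)
  (r.1, r.2.1)

-- first pass: top = [-1]*len(matrix[0]); for i in range(len(matrix)): …
def frPass1 (m : List String) : FRD × List Int :=
  (PySem.List.pyRange 0 (m.length : Int) 1).foldl
    (frP1Row m ((PySem.List.pyGetD m 0 "").toList.length : Int))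
    (PySem.Dict.empty, List.replicate (PySem.List.pyGetD m 0 "").toList.length (-1))

-- body of A's second (bottom-right) pass for one cell; state = (map, bottom, right)
def frP2Cell (m : List String) (i : Int) (st : FRD × List Int × Int) (j : Int) :
    FRD × List Int × Int :=
  let d := if fr_at m i j == 'O' then
      let d := PySem.Dict.modify st.1 (i, j) frDflt
        (fun v => PySem.List.pySetD v 2 (some |i - PySem.List.pyGetD st.2.1 j 0|))
      PySem.Dict.modify d (i, j) frDflt
        (fun v => PySem.List.pySetD v 3 (some |j - st.2.2|))
    else st.1
  if fr_at m i j == 'X' then (d, PySem.List.pySetD st.2.1 j i, j) else (d, st.2.1, st.2.2)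

-- one row of the second pass ('right = len(matrix[0])' then the reversed inner j-loop)
def frP2Row (m : List String) (C : Int) (st : FRD × List Int) (i : Int) : FRD × List Int :=
  let r := (PySem.List.pyRange (C - 1) (-1) (-1)).foldl (frP2Cell m i) (st.1, st.2, C)
  (r.1, r.2.1)

-- second pass: bottom = [len(matrix)]*len(matrix[0]); for i in range(len(matrix)-1, -1, -1): …
def frPass2 (m : List String) (d0 : FRD) : FRD :=
  ((PySem.List.pyRange ((m.length : Int) - 1) (-1) (-1)).foldl
    (frP2Row m ((PySem.List.pyGetD m 0 "").toList.length : Int))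
    (d0, List.replicate (PySem.List.pyGetD m 0 "").toList.length (m.length : Int))).1

def findRobot (matrix : List String) (query : List (Option Int)) : List Int :=
  let R : Int := matrix.length
  let C : Int := (PySem.List.pyGetD matrix 0 "").toList.length
  let d := frPass2 matrix (frPass1 matrix).1
  -- final pass: first (i, j) in row-major order with map[(i,j)] == query (early return)
  let res := (PySem.List.pyRange 0 R 1).foldl (fun acc i =>
    (PySem.List.pyRange 0 C 1).foldl (fun acc j =>
      match acc with
      | some r => some r
      | none => if PySem.Dict.getD d (i, j) frDflt == query then some [i, j] else none) acc) none
  match res with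
  | some r => r
  | none => [-1, -1]

-- ===== PORT B =====
-- B's 4-direction distance vector of an open cell: scan each direction for the nearest 'X'
def frVecO (m : List String) (R C i j : Int) : List (Option Int) :=
  let left := match (PySem.List.pyRange (j - 1) (-1) (-1)).find? (fun k => fr_at m i k == 'X') with
    | some k => j - k
    | none => j + 1
  let right := match (PySem.List.pyRange (j + 1) C 1).find? (fun k => fr_at m i k == 'X') with
    | some k => k - j
    | none => C - j
  let up := match (PySem.List.pyRange (i - 1) (-1) (-1)).find? (fun k => fr_at m k j == 'X') with
    | some k => i - k
    | none => i + 1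
  let down := match (PySem.List.pyRange (i + 1) R 1).find? (fun k => fr_at m k j == 'X') with
    | some k => k - i
    | none => R - i
  [some left, some up, some down, some right]

def findRobot_alt (matrix : List String) (query : List (Option Int)) : List Int :=
  let R : Int := matrix.length
  let C : Int := (PySem.List.pyGetD matrix 0 "").toList.length
  let res := (PySem.List.pyRange 0 R 1).foldl (fun acc i =>
    (PySem.List.pyRange 0 C 1).foldl (fun acc j =>
      match acc with
      | some r => some r
      | none => if fr_at matrix i j == 'O' && frVecO matrix R C i j == query
                then some [i, j] else none) acc) none
  match res with
  | some r => r
  | none => [-1, -1]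

-- ===== PRECONDITION & SPEC =====
-- Pre_ excludes exactly the inputs where Python A raises IndexError: the empty matrix
-- (len(matrix[0])) and matrices with a row shorter than the first row (matrix[i][j]).
def Pre_findRobot (matrix : List String) (query : List (Option Int)) : Prop :=
  matrix ≠ [] ∧ ∀ s ∈ matrix, (PySem.List.pyGetD matrix 0 "").toList.length ≤ s.toList.length
instance (matrix : List String) (query : List (Option Int)) : Decidable (Pre_findRobot matrix query) := by
  unfold Pre_findRobot; infer_instance

def pvWitness_findRobot : List String × List (Option Int) :=
  (["OX", "O."], [some 1, some 1, some 2, some 1])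

-- When query is [None]*4 and the grid has a non-'O' cell, A returns the first such cell
-- (its defaultdict gives every scanned cell a [None]*4 entry, so blocked cells match),
-- while B returns [-1, -1]; 'no robot cell found' is the intended answer, since no open
-- cell ever has that vector.
def D_findRobot (matrix : List String) (query : List (Option Int)) : Prop :=
  query = [none, none, none, none] ∧
  ∃ i < matrix.length, ∃ j < (matrix.getD 0 "").toList.length,
    (matrix.getD i "").toList.getD j ' ' ≠ 'O'
instance (matrix : List String) (query : List (Option Int)) : Decidable (D_findRobot matrix query) := by
  unfold D_findRobot; infer_instance

def Spec_findRobot (matrix : List String) (query : List (Option Int)) (out : List Int) : Prop :=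
  ¬ D_findRobot matrix query → out = findRobot_alt matrix query
instance (matrix : List String) (query : List (Option Int)) (out : List Int) : Decidable (Spec_findRobot matrix query out) := by unfold Spec_findRobot; infer_instance

def pvDiffWitness_findRobot : List String × List (Option Int) :=
  (["X"], [none, none, none, none])

def pvDiffWitnessOut_findRobot : (List Int) × (List Int) := ([0, 0], [-1, -1])

-- ===== CLAIM (what is proved, stated in full; the proofs are below) =====
def Claim_unchanged_findRobot : Prop := ∀ (matrix : List String) (query : List (Option Int)), Dom_findRobot matrix query → Pre_findRobot matrix query → Spec_findRobot matrix query (findRobot matrix query)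
def Claim_changed_findRobot : Prop := Dom_findRobot (pvDiffWitness_findRobot.1) (pvDiffWitness_findRobot.2) ∧ Pre_findRobot (pvDiffWitness_findRobot.1) (pvDiffWitness_findRobot.2) ∧ D_findRobot (pvDiffWitness_findRobot.1) (pvDiffWitness_findRobot.2) ∧ findRobot (pvDiffWitness_findRobot.1) (pvDiffWitness_findRobot.2) = pvDiffWitnessOut_findRobot.1 ∧ findRobot_alt (pvDiffWitness_findRobot.1) (pvDiffWitness_findRobot.2) = pvDiffWitnessOut_findRobot.2 ∧ pvDiffWitnessOut_findRobot.1 ≠ pvDiffWitnessOut_findRobot.2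
def Claim_exact_findRobot : Prop := ∀ (matrix : List String) (query : List (Option Int)), Dom_findRobot matrix query → Pre_findRobot matrix query → D_findRobot matrix query → findRobot matrix query ≠ findRobot_alt matrix query

-- ===== LEMMAS AND PROOFS =====

-- Nearest-blocker indices, defined by the forward recurrences A's boundary variables satisfy.
-- frL m i j: index of the last 'X' left of column j in row i, else -1 (A's 'left' before column j)
def frL (m : List String) (i : Int) : Nat → Int
  | 0 => -1
  | j + 1 => if fr_at m i j == 'X' then (j : Int) else frL m i j

-- frT m j i: row of the last 'X' above row i in column j, else -1 (A's 'top[j]' before row i)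
def frT (m : List String) (j : Int) : Nat → Int
  | 0 => -1
  | i + 1 => if fr_at m (i : Int) j == 'X' then (i : Int) else frT m j i

-- frR m i C t: first 'X' at column ≥ C - t in row i, else C (A's 'right' after t columns)
def frR (m : List String) (i : Int) (C : Nat) : Nat → Int
  | 0 => (C : Int)
  | t + 1 => if fr_at m i ((C : Int) - 1 - t) == 'X' then (C : Int) - 1 - t else frR m i C t

-- frB m j R t: first 'X' at row ≥ R - t in column j, else R (A's 'bottom[j]' after t rows)
def frB (m : List String) (j : Int) (R : Nat) : Nat → Int
  | 0 => (R : Int)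
  | t + 1 => if fr_at m ((R : Int) - 1 - t) j == 'X' then (R : Int) - 1 - t else frB m j R t

-- the value A's dict holds for cell (p,q) after pass 1
def frCell1 (m : List String) (p q : Nat) : List (Option Int) :=
  if fr_at m p q == 'O' then
    [some |(q : Int) - frL m p q|, some |(p : Int) - frT m q p|, none, none]
  else frDflt

-- the value A's dict holds for cell (p,q) after both passes
def frCell (m : List String) (R C p q : Nat) : List (Option Int) :=
  if fr_at m p q == 'O' then
    [some |(q : Int) - frL m p q|, some |(p : Int) - frT m q p|,
     some |(p : Int) - frB m q R (R - 1 - p)|, some |(q : Int) - frR m p C (C - 1 - q)|]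
  else frDflt

theorem frL_find (m : List String) (i : Int) (j : Nat) :
    frL m i j = (match (PySem.List.pyRange ((j : Int) - 1) (-1) (-1)).find?
        (fun k => fr_at m i k == 'X') with
      | some k => k
      | none => -1) := by
  induction j with
  | zero =>
      rw [show ((0:Nat):Int) - 1 = -1 by norm_num, PySem.List.pyRange_neg_one_eq_nil le_rfl]
      simp [frL]
  | succ j ih =>
      rw [show ((j+1:Nat):Int) - 1 = (j:Int) by push_cast; ring,
          PySem.List.pyRange_neg_one_cons (by omega : (-1:Int) < (j:Int))]
      by_cases hx : fr_at m i (j:Int) == 'X'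
      · simp [frL, List.find?, hx]
      · simp only [List.find?, hx]
        simpa [frL, hx] using ih

theorem frT_find (m : List String) (j : Int) (i : Nat) :
    frT m j i = (match (PySem.List.pyRange ((i : Int) - 1) (-1) (-1)).find?
        (fun k => fr_at m k j == 'X') with
      | some k => k
      | none => -1) := by
  induction i with
  | zero =>
      rw [show ((0:Nat):Int) - 1 = -1 by norm_num, PySem.List.pyRange_neg_one_eq_nil le_rfl]
      simp [frT]
  | succ i ih =>
      rw [show ((i+1:Nat):Int) - 1 = (i:Int) by push_cast; ring,
          PySem.List.pyRange_neg_one_cons (by omega : (-1:Int) < (i:Int))]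
      by_cases hx : fr_at m (i:Int) j == 'X'
      · simp [frT, List.find?, hx]
      · simp only [List.find?, hx]
        simpa [frT, hx] using ih

theorem frR_find (m : List String) (i : Int) (C : Nat) (t : Nat) (ht : t ≤ C) :
    frR m i C t = (match (PySem.List.pyRange ((C : Int) - t) (C : Int) 1).find?
        (fun k => fr_at m i k == 'X') with
      | some k => k
      | none => (C : Int)) := by
  induction t with
  | zero =>
      rw [show ((C:Int) - ((0:Nat):Int)) = (C:Int) by norm_num, PySem.List.pyRange_one_eq_nil le_rfl]
      simp [frR]
  | succ t ih =>
      have harith : ((C:Int) - 1 - (t:Int)) = (C:Int) - ((t+1:Nat):Int) := by push_cast; ring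
      rw [PySem.List.pyRange_one_cons (by omega : (C:Int) - ((t+1:Nat):Int) < (C:Int)),
          show (C:Int) - ((t+1:Nat):Int) + 1 = (C:Int) - (t:Int) by push_cast; ring]
      by_cases hx : fr_at m i ((C:Int) - ((t+1:Nat):Int)) == 'X'
      · have hstep : frR m i C (t+1) = (C:Int) - ((t+1:Nat):Int) := by
          unfold frR; rw [harith]; exact if_pos hx
        simp only [List.find?, hx, hstep]
      · simp only [List.find?, hx]
        have hx' : ¬ fr_at m i ((C:Int) - 1 - (t:Int)) = 'X' := by
          rw [harith]; simpa using hx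
        rw [show frR m i C (t+1) = frR m i C t by simp [frR, hx']]
        exact ih (by omega)

theorem frB_find (m : List String) (j : Int) (R : Nat) (t : Nat) (ht : t ≤ R) :
    frB m j R t = (match (PySem.List.pyRange ((R : Int) - t) (R : Int) 1).find?
        (fun k => fr_at m k j == 'X') with
      | some k => k
      | none => (R : Int)) := by
  induction t with
  | zero =>
      rw [show ((R:Int) - ((0:Nat):Int)) = (R:Int) by norm_num, PySem.List.pyRange_one_eq_nil le_rfl]
      simp [frB]
  | succ t ih =>
      have harith : ((R:Int) - 1 - (t:Int)) = (R:Int) - ((t+1:Nat):Int) := by push_cast; ring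
      rw [PySem.List.pyRange_one_cons (by omega : (R:Int) - ((t+1:Nat):Int) < (R:Int)),
          show (R:Int) - ((t+1:Nat):Int) + 1 = (R:Int) - (t:Int) by push_cast; ring]
      by_cases hx : fr_at m ((R:Int) - ((t+1:Nat):Int)) j == 'X'
      · have hstep : frB m j R (t+1) = (R:Int) - ((t+1:Nat):Int) := by
          unfold frB; rw [harith]; exact if_pos hx
        simp only [List.find?, hx, hstep]
      · simp only [List.find?, hx]
        have hx' : ¬ fr_at m ((R:Int) - 1 - (t:Int)) j = 'X' := by
          rw [harith]; simpa using hx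
        rw [show frB m j R (t+1) = frB m j R t by simp [frB, hx']]
        exact ih (by omega)

theorem frL_bounds (m : List String) (i : Int) (j : Nat) : -1 ≤ frL m i j ∧ frL m i j < j := by
  induction j with
  | zero => simp [frL]
  | succ j ih => unfold frL; split <;> push_cast <;> push_cast at ih <;> omega

theorem frT_bounds (m : List String) (j : Int) (i : Nat) : -1 ≤ frT m j i ∧ frT m j i < i := by
  induction i with
  | zero => simp [frT]
  | succ i ih => unfold frT; split <;> push_cast <;> push_cast at ih <;> omega

theorem frR_bounds (m : List String) (i : Int) (C t : Nat) :
    (C : Int) - t ≤ frR m i C t ∧ frR m i C t ≤ C := by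
  induction t with
  | zero => simp [frR]
  | succ t ih => unfold frR; split <;> push_cast <;> push_cast at ih <;> omega

theorem frB_bounds (m : List String) (j : Int) (R t : Nat) :
    (R : Int) - t ≤ frB m j R t ∧ frB m j R t ≤ R := by
  induction t with
  | zero => simp [frB]
  | succ t ih => unfold frB; split <;> push_cast <;> push_cast at ih <;> omega

-- B's per-cell vector is exactly the O-branch of the canonical cell value
theorem frVecO_eq (m : List String) (R C : Nat) (p q : Nat) (hp : p < R) (hq : q < C) :
    frVecO m (R : Int) (C : Int) (p : Int) (q : Int) =
      [some |(q : Int) - frL m p q|, some |(p : Int) - frT m q p|,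
       some |(p : Int) - frB m q R (R - 1 - p)|, some |(q : Int) - frR m p C (C - 1 - q)|] := by
  have hbL := frL_bounds m (p : Int) q
  have hbT := frT_bounds m (q : Int) p
  have hbR := frR_bounds m (p : Int) C (C - 1 - q)
  have hbB := frB_bounds m (q : Int) R (R - 1 - p)
  have hfR := frR_find m (p : Int) C (C - 1 - q) (by omega)
  have hfB := frB_find m (q : Int) R (R - 1 - p) (by omega)
  rw [show ((C : Int) - ((C - 1 - q : Nat) : Int)) = (q : Int) + 1 by omega] at hfR
  rw [show ((R : Int) - ((R - 1 - p : Nat) : Int)) = (p : Int) + 1 by omega] at hfB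
  have hleft : (match (PySem.List.pyRange ((q : Int) - 1) (-1) (-1)).find?
        (fun k => fr_at m (p : Int) k == 'X') with
      | some k => (q : Int) - k
      | none => (q : Int) + 1) = |(q : Int) - frL m (p : Int) q| := by
    have hf := frL_find m (p : Int) q
    rcases h : (PySem.List.pyRange ((q : Int) - 1) (-1) (-1)).find?
        (fun k => fr_at m (p : Int) k == 'X') with _ | k
    · rw [h] at hf; simp only [] at hf
      show (q : Int) + 1 = _
      rcases abs_cases ((q : Int) - frL m (p : Int) q) with ⟨ha, _⟩ | ⟨ha, _⟩ <;> rw [ha] <;> omega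
    · rw [h] at hf; simp only [] at hf
      show (q : Int) - k = _
      rcases abs_cases ((q : Int) - frL m (p : Int) q) with ⟨ha, _⟩ | ⟨ha, _⟩ <;> rw [ha] <;> omega
  have hup : (match (PySem.List.pyRange ((p : Int) - 1) (-1) (-1)).find?
        (fun k => fr_at m k (q : Int) == 'X') with
      | some k => (p : Int) - k
      | none => (p : Int) + 1) = |(p : Int) - frT m (q : Int) p| := by
    have hf := frT_find m (q : Int) p
    rcases h : (PySem.List.pyRange ((p : Int) - 1) (-1) (-1)).find?
        (fun k => fr_at m k (q : Int) == 'X') with _ | k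
    · rw [h] at hf; simp only [] at hf
      show (p : Int) + 1 = _
      rcases abs_cases ((p : Int) - frT m (q : Int) p) with ⟨ha, _⟩ | ⟨ha, _⟩ <;> rw [ha] <;> omega
    · rw [h] at hf; simp only [] at hf
      show (p : Int) - k = _
      rcases abs_cases ((p : Int) - frT m (q : Int) p) with ⟨ha, _⟩ | ⟨ha, _⟩ <;> rw [ha] <;> omega
  have hright : (match (PySem.List.pyRange ((q : Int) + 1) (C : Int) 1).find?
        (fun k => fr_at m (p : Int) k == 'X') with
      | some k => k - (q : Int)
      | none => (C : Int) - (q : Int)) = |(q : Int) - frR m (p : Int) C (C - 1 - q)| := by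
    rcases h : (PySem.List.pyRange ((q : Int) + 1) (C : Int) 1).find?
        (fun k => fr_at m (p : Int) k == 'X') with _ | k
    · rw [h] at hfR; simp only [] at hfR
      show (C : Int) - (q : Int) = _
      rcases abs_cases ((q : Int) - frR m (p : Int) C (C - 1 - q)) with ⟨ha, _⟩ | ⟨ha, _⟩ <;>
        rw [ha] <;> omega
    · rw [h] at hfR; simp only [] at hfR
      show k - (q : Int) = _
      rcases abs_cases ((q : Int) - frR m (p : Int) C (C - 1 - q)) with ⟨ha, _⟩ | ⟨ha, _⟩ <;>
        rw [ha] <;> omega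
  have hdown : (match (PySem.List.pyRange ((p : Int) + 1) (R : Int) 1).find?
        (fun k => fr_at m k (q : Int) == 'X') with
      | some k => k - (p : Int)
      | none => (R : Int) - (p : Int)) = |(p : Int) - frB m (q : Int) R (R - 1 - p)| := by
    rcases h : (PySem.List.pyRange ((p : Int) + 1) (R : Int) 1).find?
        (fun k => fr_at m k (q : Int) == 'X') with _ | k
    · rw [h] at hfB; simp only [] at hfB
      show (R : Int) - (p : Int) = _
      rcases abs_cases ((p : Int) - frB m (q : Int) R (R - 1 - p)) with ⟨ha, _⟩ | ⟨ha, _⟩ <;>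
        rw [ha] <;> omega
    · rw [h] at hfB; simp only [] at hfB
      show k - (p : Int) = _
      rcases abs_cases ((p : Int) - frB m (q : Int) R (R - 1 - p)) with ⟨ha, _⟩ | ⟨ha, _⟩ <;>
        rw [ha] <;> omega
  unfold frVecO
  rw [hleft, hup, hdown, hright]

-- ---- pass-1 invariant ----

-- dict state during pass 1: cells before (hi, hj) in row-major order carry their pass-1 value
def Inv1D (m : List String) (R C : Nat) (d : FRD) (hi hj : Nat) : Prop :=
  ∀ p q : Nat, p < R → q < C →
    PySem.Dict.getD d ((p : Int), (q : Int)) frDflt =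
      if p < hi ∨ (p = hi ∧ q < hj) then frCell1 m p q else frDflt

def Inv1 (m : List String) (R C : Nat) (i j : Nat) (st : FRD × List Int × Int) : Prop :=
  Inv1D m R C st.1 i j ∧ st.2.1.length = C ∧
    (∀ q : Nat, q < C →
      PySem.List.pyGetD st.2.1 (q : Int) 0 = frT m q (if q < j then i + 1 else i)) ∧
    st.2.2 = frL m (i : Int) j

theorem setL0 (v : Option Int) : PySem.List.pySetD frDflt 0 v = [v, none, none, none] := by rfl

theorem setL1 (a v : Option Int) :
    PySem.List.pySetD [a, none, none, none] 1 v = [a, v, none, none] := by rfl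

theorem setL2 (a b v : Option Int) :
    PySem.List.pySetD [a, b, none, none] 2 v = [a, b, v, none] := by rfl

theorem setL3 (a b c v : Option Int) :
    PySem.List.pySetD [a, b, c, none] 3 v = [a, b, c, v] := by rfl

theorem getD_modify2 (d : FRD) (k k' : Int × Int) (f g : List (Option Int) → List (Option Int)) :
    (PySem.Dict.modify (PySem.Dict.modify d k frDflt f) k frDflt g).getD k' frDflt =
      if k' = k then g (f (d.getD k frDflt)) else d.getD k' frDflt := by
  by_cases h : k' = k <;> simp [PySem.Dict.getD_modify, h]

theorem frL_succ (m : List String) (i : Int) (j : Nat)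
    (hx : (fr_at m i (j : Int) == 'X') = false) : frL m i (j + 1) = frL m i j := by
  simp [frL, hx]

theorem frL_succX (m : List String) (i : Int) (j : Nat)
    (hx : (fr_at m i (j : Int) == 'X') = true) : frL m i (j + 1) = (j : Int) := by
  simp [frL, hx]

theorem frT_succ (m : List String) (j : Int) (i : Nat)
    (hx : (fr_at m (i : Int) j == 'X') = false) : frT m j (i + 1) = frT m j i := by
  simp [frT, hx]

theorem frT_succX (m : List String) (j : Int) (i : Nat)
    (hx : (fr_at m (i : Int) j == 'X') = true) : frT m j (i + 1) = (i : Int) := by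
  simp [frT, hx]

theorem step1 (m : List String) (R C : Nat) (i j : Nat) (hi : i < R) (hj : j < C)
    (st : FRD × List Int × Int) (h : Inv1 m R C i j st) :
    Inv1 m R C i (j + 1) (frP1Cell m (i : Int) st (j : Int)) := by
  obtain ⟨hd, hlen, htop, hlft⟩ := h
  by_cases hO : fr_at m (i : Int) (j : Int) == 'O'
  · -- cell is 'O': the dict gains the pass-1 value at (i, j); top and left are unchanged
    have hX : (fr_at m (i : Int) (j : Int) == 'X') = false := by
      have := eq_of_beq hO; simp [this]
    simp only [frP1Cell, hO, hX, if_true, Bool.false_eq_true, if_false]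
    refine ⟨?_, hlen, ?_, ?_⟩ <;> dsimp only
    · intro p q hp hq
      rw [getD_modify2]
      by_cases hpq : p = i ∧ q = j
      · obtain ⟨rfl, rfl⟩ := hpq
        rw [if_pos rfl, hd p q hp hq, if_neg (by omega), if_pos (by omega)]
        rw [hlft, htop q hq, if_neg (by omega : ¬ q < q)]
        rw [setL0, setL1]
        unfold frCell1
        rw [if_pos hO]
      · have hne : ¬ (((p : Int), (q : Int)) = ((i : Int), (j : Int))) := by
          simp only [Prod.mk.injEq, Nat.cast_inj]; tauto
        rw [if_neg hne, hd p q hp hq]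
        split_ifs <;> first | rfl | omega
    · intro q hq
      rcases eq_or_ne q j with rfl | hqj
      · rw [htop q hq, if_neg (by omega : ¬ q < q), if_pos (by omega : q < q + 1),
            frT_succ m (q : Int) i hX]
      · rw [htop q hq]
        by_cases hlt : q < j
        · rw [if_pos hlt, if_pos (by omega)]
        · rw [if_neg hlt, if_neg (by omega)]
    · rw [hlft, frL_succ m (i : Int) j hX]
  · have hO' : (fr_at m (i : Int) (j : Int) == 'O') = false := by simpa using hO
    by_cases hX : fr_at m (i : Int) (j : Int) == 'X'
    · -- cell is 'X': dict unchanged, boundary state updated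
      simp only [frP1Cell, hO', hX, Bool.false_eq_true, if_false, if_true]
      refine ⟨?_, ?_, ?_, ?_⟩ <;> dsimp only
      · intro p q hp hq
        rw [hd p q hp hq]
        by_cases hpq : p = i ∧ q = j
        · obtain ⟨rfl, rfl⟩ := hpq
          rw [if_neg (by omega), if_pos (by omega)]
          unfold frCell1
          rw [if_neg (by simp [hO'])]
        · split_ifs <;> first | rfl | omega
      · simpa [PySem.List.length_pySetD] using hlen
      · intro q hq
        rw [PySem.List.pyGetD_pySetD_natCast st.2.1 j q ((i : Nat) : Int) 0 (by rw [hlen]; exact hj)]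
        rcases eq_or_ne q j with rfl | hqj
        · rw [if_pos rfl, if_pos (by omega : q < q + 1), frT_succX m (q : Int) i hX]
        · rw [if_neg (by simpa using hqj), htop q hq]
          by_cases hlt : q < j
          · rw [if_pos hlt, if_pos (by omega)]
          · rw [if_neg hlt, if_neg (by omega)]
      · rw [frL_succX m (i : Int) j hX]
    · -- cell is neither 'O' nor 'X': nothing changes
      have hX' : (fr_at m (i : Int) (j : Int) == 'X') = false := by simpa using hX
      simp only [frP1Cell, hO', hX', Bool.false_eq_true, if_false]
      refine ⟨?_, hlen, ?_, ?_⟩ <;> dsimp only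
      · intro p q hp hq
        rw [hd p q hp hq]
        by_cases hpq : p = i ∧ q = j
        · obtain ⟨rfl, rfl⟩ := hpq
          rw [if_neg (by omega), if_pos (by omega)]
          unfold frCell1
          rw [if_neg (by simp [hO'])]
        · split_ifs <;> first | rfl | omega
      · intro q hq
        rw [htop q hq]
        rcases eq_or_ne q j with rfl | hqj
        · rw [if_neg (by omega : ¬ q < q), if_pos (by omega : q < q + 1),
              frT_succ m (q : Int) i hX']
        · by_cases hlt : q < j
          · rw [if_pos hlt, if_pos (by omega)]
          · rw [if_neg hlt, if_neg (by omega)]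
      · rw [hlft, frL_succ m (i : Int) j hX']

theorem inner1 (m : List String) (R C : Nat) (i : Nat) (hi : i < R) :
    ∀ (n j : Nat), j + n = C → ∀ st, Inv1 m R C i j st →
      Inv1 m R C i C ((PySem.List.pyRange (j : Int) (C : Int) 1).foldl (frP1Cell m (i : Int)) st) := by
  intro n
  induction n with
  | zero =>
      intro j hj st hst
      have : j = C := by omega
      subst this
      rw [PySem.List.pyRange_one_eq_nil le_rfl]
      simpa using hst
  | succ n ih =>
      intro j hj st hst
      rw [PySem.List.pyRange_one_cons (by omega : (j : Int) < (C : Int)), List.foldl_cons,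
          show (j : Int) + 1 = ((j + 1 : Nat) : Int) by push_cast; ring]
      exact ih (j + 1) (by omega) _ (step1 m R C i j hi (by omega) st hst)

def Out1 (m : List String) (R C : Nat) (i : Nat) (st : FRD × List Int) : Prop :=
  Inv1D m R C st.1 i 0 ∧ st.2.length = C ∧
    (∀ q : Nat, q < C → PySem.List.pyGetD st.2 (q : Int) 0 = frT m q i)

theorem outer1 (m : List String) (R C : Nat) :
    ∀ (n i : Nat), i + n = R → ∀ st, Out1 m R C i st →
      Out1 m R C R ((PySem.List.pyRange (i : Int) (R : Int) 1).foldl (frP1Row m (C : Int)) st) := by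
  intro n
  induction n with
  | zero =>
      intro i hi st hst
      have : i = R := by omega
      subst this
      rw [PySem.List.pyRange_one_eq_nil le_rfl]
      simpa using hst
  | succ n ih =>
      intro i hi st hst
      rw [PySem.List.pyRange_one_cons (by omega : (i : Int) < (R : Int)), List.foldl_cons,
          show (i : Int) + 1 = ((i + 1 : Nat) : Int) by push_cast; ring]
      refine ih (i + 1) (by omega) _ ?_
      -- one row preserves the outer invariant
      obtain ⟨hd, hlen, htop⟩ := hst
      have hinner : Inv1 m R C i 0 (st.1, st.2, -1) := by
        refine ⟨hd, hlen, ?_, rfl⟩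
        intro q hq
        simpa using htop q hq
      have hres := inner1 m R C i (by omega) (C - 0) 0 (by omega) _ hinner
      rw [show ((0 : Nat) : Int) = 0 by norm_num] at hres
      obtain ⟨hd', hlen', htop', _⟩ := hres
      refine ⟨?_, hlen', ?_⟩
      · intro p q hp hq
        unfold frP1Row
        rw [hd' p q hp hq]
        split_ifs <;> first | rfl | omega
      · intro q hq
        unfold frP1Row
        rw [htop' q hq, if_pos hq]

theorem pass1_spec (m : List String) :
    Inv1D m m.length ((PySem.List.pyGetD m 0 "").toList.length) (frPass1 m).1 m.length 0 := by
  have h0 : Out1 m m.length ((PySem.List.pyGetD m 0 "").toList.length) 0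
      (PySem.Dict.empty, List.replicate (PySem.List.pyGetD m 0 "").toList.length (-1)) := by
    refine ⟨?_, by simp, ?_⟩
    · intro p q hp hq
      rw [if_neg (by omega)]
      exact PySem.Dict.getD_empty ..
    · intro q hq
      rw [PySem.List.pyGetD_natCast, List.getD_eq_getElem?_getD, List.getElem?_replicate,
          if_pos hq]
      simp [frT]
  have := outer1 m m.length ((PySem.List.pyGetD m 0 "").toList.length) m.length 0 (by omega) _ h0
  rw [show ((0 : Nat) : Int) = 0 by norm_num] at this
  exact this.1

-- ---- pass-2 invariant ----

-- dict state during pass 2, about to process cell (n-1, k-1)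
def Inv2D (m : List String) (R C : Nat) (d : FRD) (n k : Nat) : Prop :=
  ∀ p q : Nat, p < R → q < C →
    PySem.Dict.getD d ((p : Int), (q : Int)) frDflt =
      if n ≤ p ∨ (p + 1 = n ∧ k ≤ q) then frCell m R C p q else frCell1 m p q

def Inv2 (m : List String) (R C : Nat) (n k : Nat) (st : FRD × List Int × Int) : Prop :=
  Inv2D m R C st.1 n k ∧ st.2.1.length = C ∧
    (∀ q : Nat, q < C →
      PySem.List.pyGetD st.2.1 (q : Int) 0 = frB m q R (if k ≤ q then R + 1 - n else R - n)) ∧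
    st.2.2 = frR m ((n : Int) - 1) C (C - k)

theorem frR_succ (m : List String) (i : Int) (C : Nat) (t : Nat)
    (hx : (fr_at m i ((C : Int) - 1 - (t : Int)) == 'X') = false) :
    frR m i C (t + 1) = frR m i C t := by
  simp [frR, hx]

theorem frR_succX (m : List String) (i : Int) (C : Nat) (t : Nat)
    (hx : (fr_at m i ((C : Int) - 1 - (t : Int)) == 'X') = true) :
    frR m i C (t + 1) = (C : Int) - 1 - (t : Int) := by
  simp [frR, hx]

theorem frB_succ (m : List String) (j : Int) (R : Nat) (t : Nat)
    (hx : (fr_at m ((R : Int) - 1 - (t : Int)) j == 'X') = false) :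
    frB m j R (t + 1) = frB m j R t := by
  simp [frB, hx]

theorem frB_succX (m : List String) (j : Int) (R : Nat) (t : Nat)
    (hx : (fr_at m ((R : Int) - 1 - (t : Int)) j == 'X') = true) :
    frB m j R (t + 1) = (R : Int) - 1 - (t : Int) := by
  simp [frB, hx]

set_option maxHeartbeats 1000000 in
theorem step2 (m : List String) (R C : Nat) (n k : Nat) (hn1 : 1 ≤ n) (hn : n ≤ R) (hk : k < C)
    (st : FRD × List Int × Int) (h : Inv2 m R C n (k + 1) st) :
    Inv2 m R C n k (frP2Cell m ((n : Int) - 1) st (k : Int)) := by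
  obtain ⟨hd, hlen, hbot, hrt⟩ := h
  have hRn : ((R : Int) - 1 - ((R - n : Nat) : Int)) = (n : Int) - 1 := by omega
  have hCk : ((C : Int) - 1 - ((C - (k + 1) : Nat) : Int)) = (k : Int) := by omega
  have hRn' : R - n + 1 = R + 1 - n := by omega
  have hCk' : C - (k + 1) + 1 = C - k := by omega
  by_cases hO : fr_at m ((n : Int) - 1) (k : Int) == 'O'
  · -- cell is 'O': the dict entry at (n-1, k) is completed; bottom and right unchanged
    have hX : (fr_at m ((n : Int) - 1) (k : Int) == 'X') = false := by
      have := eq_of_beq hO; simp [this]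
    simp only [frP2Cell, hO, hX, if_true, Bool.false_eq_true, if_false]
    refine ⟨?_, hlen, ?_, ?_⟩ <;> dsimp only
    · intro p q hp hq
      rw [getD_modify2]
      by_cases hpq : p + 1 = n ∧ q = k
      · obtain ⟨hp1, rfl⟩ := hpq
        have hpc : ((n : Int) - 1) = (p : Int) := by omega
        rw [hpc] at hO hX hrt ⊢
        rw [if_pos rfl, if_pos (by omega), hd p q hp hq, if_neg (by omega), hrt, hbot q hq,
            if_neg (by omega)]
        unfold frCell1
        rw [if_pos hO, setL2, setL3]
        unfold frCell
        rw [if_pos hO, show R - n = R - 1 - p by omega, show C - (q + 1) = C - 1 - q by omega]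
      · have hne : ¬ (((p : Int), (q : Int)) = ((n : Int) - 1, (k : Int))) := by
          simp only [Prod.mk.injEq]
          intro ⟨h1, h2⟩
          exact hpq ⟨by omega, by exact_mod_cast h2⟩
        rw [if_neg hne, hd p q hp hq]
        split_ifs <;> first | rfl | omega
    · intro q hq
      rw [hbot q hq]
      rcases eq_or_ne q k with rfl | hqk
      · rw [if_neg (by omega), if_pos (by omega), ← hRn',
            frB_succ m (q : Int) R (R - n) (by rw [hRn]; exact hX)]
      · by_cases hlt : k + 1 ≤ q
        · rw [if_pos hlt, if_pos (by omega)]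
        · rw [if_neg hlt, if_neg (by omega)]
    · rw [hrt, ← hCk']
      exact (frR_succ m ((n : Int) - 1) C (C - (k + 1)) (by rw [hCk]; exact hX)).symm
  · have hO' : (fr_at m ((n : Int) - 1) (k : Int) == 'O') = false := by simpa using hO
    by_cases hX : fr_at m ((n : Int) - 1) (k : Int) == 'X'
    · -- cell is 'X': dict unchanged, boundary state updated
      simp only [frP2Cell, hO', hX, Bool.false_eq_true, if_false, if_true]
      refine ⟨?_, ?_, ?_, ?_⟩ <;> dsimp only
      · intro p q hp hq
        rw [hd p q hp hq]
        by_cases hpq : p + 1 = n ∧ q = k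
        · obtain ⟨hp1, rfl⟩ := hpq
          have hpc : ((n : Int) - 1) = (p : Int) := by omega
          rw [hpc] at hO'
          rw [if_neg (by omega), if_pos (by omega)]
          unfold frCell1 frCell
          rw [if_neg (by simp [hO']), if_neg (by simp [hO'])]
        · split_ifs <;> first | rfl | omega
      · simpa [PySem.List.length_pySetD] using hlen
      · intro q hq
        rw [PySem.List.pyGetD_pySetD_natCast st.2.1 k q ((n : Int) - 1) 0 (by rw [hlen]; exact hk)]
        rcases eq_or_ne q k with rfl | hqk
        · rw [if_pos rfl, if_pos (by omega), ← hRn',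
              frB_succX m (q : Int) R (R - n) (by rw [hRn]; exact hX), hRn]
        · rw [if_neg (by simpa using hqk), hbot q hq]
          by_cases hlt : k + 1 ≤ q
          · rw [if_pos hlt, if_pos (by omega)]
          · rw [if_neg hlt, if_neg (by omega)]
      · rw [← hCk', frR_succX m ((n : Int) - 1) C (C - (k + 1)) (by rw [hCk]; exact hX), hCk]
    · -- cell is neither 'O' nor 'X': nothing changes
      have hX' : (fr_at m ((n : Int) - 1) (k : Int) == 'X') = false := by simpa using hX
      simp only [frP2Cell, hO', hX', Bool.false_eq_true, if_false]
      refine ⟨?_, hlen, ?_, ?_⟩ <;> dsimp only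
      · intro p q hp hq
        rw [hd p q hp hq]
        by_cases hpq : p + 1 = n ∧ q = k
        · obtain ⟨hp1, rfl⟩ := hpq
          have hpc : ((n : Int) - 1) = (p : Int) := by omega
          rw [hpc] at hO'
          rw [if_neg (by omega), if_pos (by omega)]
          unfold frCell1 frCell
          rw [if_neg (by simp [hO']), if_neg (by simp [hO'])]
        · split_ifs <;> first | rfl | omega
      · intro q hq
        rw [hbot q hq]
        rcases eq_or_ne q k with rfl | hqk
        · rw [if_neg (by omega), if_pos (by omega), ← hRn',
              frB_succ m (q : Int) R (R - n) (by rw [hRn]; exact hX')]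
        · by_cases hlt : k + 1 ≤ q
          · rw [if_pos hlt, if_pos (by omega)]
          · rw [if_neg hlt, if_neg (by omega)]
      · rw [hrt, ← hCk']
        exact (frR_succ m ((n : Int) - 1) C (C - (k + 1)) (by rw [hCk]; exact hX')).symm

theorem inner2 (m : List String) (R C : Nat) (n : Nat) (hn1 : 1 ≤ n) (hn : n ≤ R) :
    ∀ (k : Nat), k ≤ C → ∀ st, Inv2 m R C n k st →
      Inv2 m R C n 0 ((PySem.List.pyRange ((k : Int) - 1) (-1) (-1)).foldl
        (frP2Cell m ((n : Int) - 1)) st) := by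
  intro k
  induction k with
  | zero =>
      intro _ st hst
      rw [show ((0 : Nat) : Int) - 1 = -1 by norm_num, PySem.List.pyRange_neg_one_eq_nil le_rfl]
      simpa using hst
  | succ k ih =>
      intro hk st hst
      rw [show ((k + 1 : Nat) : Int) - 1 = (k : Int) by push_cast; ring,
          PySem.List.pyRange_neg_one_cons (by omega : (-1 : Int) < (k : Int)), List.foldl_cons]
      exact ih (by omega) _ (step2 m R C n k hn1 hn (by omega) st hst)

def Out2 (m : List String) (R C : Nat) (n : Nat) (st : FRD × List Int) : Prop :=
  (∀ p q : Nat, p < R → q < C →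
    PySem.Dict.getD st.1 ((p : Int), (q : Int)) frDflt =
      if n ≤ p then frCell m R C p q else frCell1 m p q) ∧
  st.2.length = C ∧
    (∀ q : Nat, q < C → PySem.List.pyGetD st.2 (q : Int) 0 = frB m q R (R - n))

theorem outer2 (m : List String) (R C : Nat) :
    ∀ (n : Nat), n ≤ R → ∀ st, Out2 m R C n st →
      Out2 m R C 0 ((PySem.List.pyRange ((n : Int) - 1) (-1) (-1)).foldl (frP2Row m (C : Int)) st) := by
  intro n
  induction n with
  | zero =>
      intro _ st hst
      rw [show ((0 : Nat) : Int) - 1 = -1 by norm_num, PySem.List.pyRange_neg_one_eq_nil le_rfl]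
      simpa using hst
  | succ n ih =>
      intro hn st hst
      have hcast : ((n + 1 : Nat) : Int) - 1 = (n : Int) := by push_cast; ring
      rw [hcast, PySem.List.pyRange_neg_one_cons (by omega : (-1 : Int) < (n : Int)),
          List.foldl_cons]
      refine ih (by omega) _ ?_
      -- one row preserves the outer invariant
      obtain ⟨hd, hlen, hbot⟩ := hst
      have hinner : Inv2 m R C (n + 1) C (st.1, st.2, (C : Int)) := by
        refine ⟨?_, hlen, ?_, ?_⟩
        · intro p q hp hq
          rw [hd p q hp hq]
          split_ifs <;> first | rfl | omega
        · intro q hq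
          rw [hbot q hq, if_neg (by omega)]
        · rw [Nat.sub_self]
          rfl
      have hres := inner2 m R C (n + 1) (by omega) (by omega) C le_rfl _ hinner
      rw [hcast] at hres
      obtain ⟨hd', hlen', hbot', _⟩ := hres
      refine ⟨?_, hlen', ?_⟩
      · intro p q hp hq
        unfold frP2Row
        rw [hd' p q hp hq]
        split_ifs <;> first | rfl | omega
      · intro q hq
        unfold frP2Row
        rw [hbot' q hq, if_pos (by omega : 0 ≤ q), show R + 1 - (n + 1) = R - n by omega]

theorem pass2_spec (m : List String) :
    ∀ p q : Nat, p < m.length → q < (PySem.List.pyGetD m 0 "").toList.length →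
      PySem.Dict.getD (frPass2 m (frPass1 m).1) ((p : Int), (q : Int)) frDflt =
        frCell m m.length ((PySem.List.pyGetD m 0 "").toList.length) p q := by
  intro p q hp hq
  have h1 := pass1_spec m
  have h0 : Out2 m m.length ((PySem.List.pyGetD m 0 "").toList.length) m.length
      ((frPass1 m).1, List.replicate ((PySem.List.pyGetD m 0 "").toList.length) (m.length : Int)) := by
    refine ⟨?_, by rw [List.length_replicate], ?_⟩
    · intro p q hp hq
      rw [h1 p q hp hq, if_pos (by omega), if_neg (by omega)]
    · intro q hq
      rw [PySem.List.pyGetD_natCast, List.getD_eq_getElem?_getD, List.getElem?_replicate,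
          if_pos hq, Nat.sub_self]
      rfl
  have hout := outer2 m m.length ((PySem.List.pyGetD m 0 "").toList.length) m.length le_rfl _ h0
  have := hout.1 p q hp hq
  rw [if_pos (by omega)] at this
  exact this

-- ---- per-cell comparison and first-match folds ----

-- fr_at at nonnegative indices is the plain nested getD used by D_
theorem fr_at_natCast (m : List String) (p q : Nat) :
    fr_at m (p : Int) (q : Int) = (m.getD p "").toList.getD q ' ' := by
  unfold fr_at
  rw [PySem.List.pyGetD_natCast, PySem.List.pyGetD_natCast]

-- outside D_, the two per-cell match tests agree on every in-grid cell
theorem cell_match_eq (m : List String) (q : List (Option Int))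
    (hD : ¬ D_findRobot m q) (p c : Nat) (hp : p < m.length)
    (hc : c < (PySem.List.pyGetD m 0 "").toList.length) :
    (frCell m m.length ((PySem.List.pyGetD m 0 "").toList.length) p c == q) =
      (fr_at m (p : Int) (c : Int) == 'O' &&
        frVecO m (m.length : Int) ((PySem.List.pyGetD m 0 "").toList.length : Int)
          (p : Int) (c : Int) == q) := by
  have hC0 : (PySem.List.pyGetD m 0 "").toList.length = (m.getD 0 "").toList.length := by
    have h := PySem.List.pyGetD_natCast (xs := m) (n := 0) (d := "")
    rw [show ((0 : Nat) : Int) = (0 : Int) by norm_num] at h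
    rw [h]
  by_cases hO : fr_at m (p : Int) (c : Int) == 'O'
  · rw [frVecO_eq m m.length _ p c hp hc]
    unfold frCell
    rw [if_pos hO, hO, Bool.true_and]
  · have hO' : (fr_at m (p : Int) (c : Int) == 'O') = false := by simpa using hO
    rw [hO', Bool.false_and]
    unfold frCell
    rw [if_neg (by simp [hO'])]
    -- frDflt == q must be false: otherwise D_ holds via this non-'O' cell
    by_cases hq : q = frDflt
    · exfalso
      refine hD ⟨hq, p, hp, c, by rwa [hC0] at hc, ?_⟩
      rw [← fr_at_natCast]
      intro h
      rw [h] at hO'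
      simp at hO'
    · have : (frDflt == q) = false := by
        simp only [beq_eq_false_iff_ne, ne_eq]
        exact fun h => hq h.symm
      rw [this]

-- first-match folds: a some accumulator is fixed
theorem foldl_some_fix {α β : Type} (step : Option β → α → Option β)
    (h : ∀ r x, step (some r) x = some r) (l : List α) (r : β) :
    l.foldl step (some r) = some r := by
  induction l with
  | nil => rfl
  | cons x l ih => rw [List.foldl_cons, h]; exact ih

-- if the predicate is false everywhere, the fold returns its accumulator
theorem foldl_match_none {α : Type} (P : α → Bool) (f : α → List Int) (l : List α)
    (h : ∀ x ∈ l, P x = false) (acc : Option (List Int)) :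
    l.foldl (fun a x => match a with
      | some r => some r
      | none => if P x then some (f x) else none) acc = acc := by
  induction l generalizing acc with
  | nil => rfl
  | cons x l ih =>
      rw [List.foldl_cons]
      cases acc with
      | some r => exact ih (fun y hy => h y (by simp [hy])) (some r)
      | none =>
          rw [show (match (none : Option (List Int)) with
              | some r => some r
              | none => if P x then some (f x) else none) = none from by
            rw [h x (by simp)]; rfl]
          exact ih (fun y hy => h y (by simp [hy])) none

-- nested first-match fold with an everywhere-false predicate returns none
theorem foldl_match_none2 (P : Int → Int → Bool) (lo li : List Int)
    (h : ∀ i ∈ lo, ∀ j ∈ li, P i j = false) :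
    lo.foldl (fun acc i => li.foldl (fun acc j => match acc with
      | some r => some r
      | none => if P i j then some [i, j] else none) acc) (none : Option (List Int)) = none := by
  induction lo with
  | nil => rfl
  | cons i lo ih =>
      rw [List.foldl_cons,
          foldl_match_none (fun j => P i j) (fun j => [i, j]) li (h i (by simp)) none]
      exact ih (fun i' hi' => h i' (by simp [hi']))

-- if some element satisfies the predicate, the fold from none is not none
theorem foldl_match_hit {α : Type} (P : α → Bool) (f : α → List Int) (l : List α)
    (x : α) (hx : x ∈ l) (hP : P x = true) :
    l.foldl (fun a y => match a with
      | some r => some r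
      | none => if P y then some (f y) else none) none ≠ none := by
  induction l with
  | nil => cases hx
  | cons y l ih =>
      rw [List.foldl_cons]
      by_cases hy : P y = true
      · rw [show (match (none : Option (List Int)) with
            | some r => some r
            | none => if P y then some (f y) else none) = some (f y) from by rw [hy]; rfl]
        rw [foldl_some_fix _ (fun r z => rfl) l (f y)]
        simp
      · have hy' : P y = false := by simpa using hy
        rw [show (match (none : Option (List Int)) with
            | some r => some r
            | none => if P y then some (f y) else none) = none from by rw [hy']; rfl]
        rcases List.mem_cons.mp hx with rfl | hx'
        · rw [hP] at hy'; cases hy'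
        · exact ih hx'

-- any result of a first-match fold from none is none or some (f x) for a member x
theorem foldl_match_shape {α : Type} (P : α → Bool) (f : α → List Int) (l : List α) :
    l.foldl (fun a y => match a with
      | some r => some r
      | none => if P y then some (f y) else none) none = none ∨
    ∃ x ∈ l, l.foldl (fun a y => match a with
      | some r => some r
      | none => if P y then some (f y) else none) none = some (f x) := by
  induction l with
  | nil => exact Or.inl rfl
  | cons y l ih =>
      rw [List.foldl_cons]
      by_cases hy : P y = true
      · refine Or.inr ⟨y, by simp, ?_⟩
        rw [show (match (none : Option (List Int)) with
            | some r => some r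
            | none => if P y then some (f y) else none) = some (f y) from by rw [hy]; rfl]
        exact foldl_some_fix _ (fun r z => rfl) l (f y)
      · have hy' : P y = false := by simpa using hy
        rw [show (match (none : Option (List Int)) with
            | some r => some r
            | none => if P y then some (f y) else none) = none from by rw [hy']; rfl]
        rcases ih with h | ⟨x, hx, h⟩
        · exact Or.inl h
        · exact Or.inr ⟨x, by simp [hx], h⟩

-- ===== VERDICT (by name: the statement is the Claim_ definition above) =====
theorem findRobot_spec : Claim_unchanged_findRobot := by
  intro matrix query _ _ hD
  unfold findRobot findRobot_alt
  dsimp only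
  have hcell : ∀ (i j : Int), i ∈ PySem.List.pyRange 0 (matrix.length : Int) 1 →
      j ∈ PySem.List.pyRange 0 ((PySem.List.pyGetD matrix 0 "").toList.length : Int) 1 →
      (PySem.Dict.getD (frPass2 matrix (frPass1 matrix).1) (i, j) frDflt == query) =
        (fr_at matrix i j == 'O' &&
          frVecO matrix (matrix.length : Int)
            ((PySem.List.pyGetD matrix 0 "").toList.length : Int) i j == query) := by
    intro i j hi hj
    rw [PySem.List.mem_pyRange_one] at hi hj
    have hip : i = ((i.toNat : Nat) : Int) := by omega
    have hjp : j = ((j.toNat : Nat) : Int) := by omega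
    rw [hip, hjp, pass2_spec matrix i.toNat j.toNat (by omega) (by omega),
        cell_match_eq matrix query hD i.toNat j.toNat (by omega) (by omega)]
  refine congrArg (fun o : Option (List Int) => match o with | some r => r | none => [-1, -1]) ?_
  refine PySem.List.foldl_congr_mem _ _ _ _ ?_
  intro acc i hi
  refine PySem.List.foldl_congr_mem _ _ _ _ ?_
  intro acc2 j hj
  cases acc2 with
  | some r => rfl
  | none => rw [hcell i j hi hj]

theorem findRobot_changed : Claim_changed_findRobot := by
  unfold Claim_changed_findRobot; decide

theorem findRobot_tight : Claim_exact_findRobot := by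
  intro matrix query _ _ hD
  obtain ⟨hq, p, hp, c, hc, hcell⟩ := hD
  have hC0 : (matrix.getD 0 "").toList.length = (PySem.List.pyGetD matrix 0 "").toList.length := by
    have h := PySem.List.pyGetD_natCast (xs := matrix) (n := 0) (d := "")
    rw [show ((0 : Nat) : Int) = (0 : Int) by norm_num] at h
    rw [h]
  rw [hC0] at hc
  subst hq
  -- B returns [-1, -1]: no open cell's all-some vector equals the all-none query
  have hBnone : findRobot_alt matrix [none, none, none, none] = [-1, -1] := by
    unfold findRobot_alt
    dsimp only
    rw [foldl_match_none2 (fun i j => fr_at matrix i j == 'O' &&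
        frVecO matrix (matrix.length : Int)
          ((PySem.List.pyGetD matrix 0 "").toList.length : Int) i j == [none, none, none, none])
        _ _ ?_]
    intro i hi j hj
    rw [PySem.List.mem_pyRange_one] at hi hj
    have hip : i = ((i.toNat : Nat) : Int) := by omega
    have hjp : j = ((j.toNat : Nat) : Int) := by omega
    dsimp only
    rw [hip, hjp,
        frVecO_eq matrix matrix.length ((PySem.List.pyGetD matrix 0 "").toList.length)
          i.toNat j.toNat (by omega) (by omega)]
    simp
  -- A's result is some cell [i, j] with i, j ≥ 0: the non-'O' cell (p, c) matches
  rw [hBnone]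
  unfold findRobot
  dsimp only
  set d := frPass2 matrix (frPass1 matrix).1 with hd
  set stepI := fun (acc : Option (List Int)) (i : Int) =>
    (PySem.List.pyRange 0 ((PySem.List.pyGetD matrix 0 "").toList.length : Int) 1).foldl
      (fun acc j =>
        match acc with
        | some r => some r
        | none => if PySem.Dict.getD d (i, j) frDflt == [none, none, none, none]
                  then some [i, j] else none) acc with hstepI
  have hfix : ∀ r i, stepI (some r) i = some r := by
    intro r i
    rw [hstepI]
    exact foldl_some_fix _ (fun r' j => rfl) _ r
  -- the outer fold is itself a first-match fold in disguise; show its result is some [i, j], i,j ≥ 0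
  have hhitP : (PySem.Dict.getD d ((p : Int), (c : Int)) frDflt == [none, none, none, none]) = true := by
    rw [pass2_spec matrix p c hp hc]
    unfold frCell
    rw [if_neg ?_]
    · rfl
    · rw [fr_at_natCast]
      simpa using hcell
  -- A's fold result is not none
  have hAinner : stepI none (p : Int) ≠ none := by
    rw [hstepI]
    refine foldl_match_hit _ (fun j => [(p : Int), j]) _ (c : Int) ?_ hhitP
    rw [PySem.List.mem_pyRange_one]
    omega
  have houter_ne : (PySem.List.pyRange 0 (matrix.length : Int) 1).foldl stepI none ≠ none := by
    have hpmem : (p : Int) ∈ PySem.List.pyRange 0 (matrix.length : Int) 1 := by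
      rw [PySem.List.mem_pyRange_one]; omega
    have hgen : ∀ (l : List Int), (p : Int) ∈ l → l.foldl stepI none ≠ none := by
      intro l
      induction l with
      | nil => intro h; cases h
      | cons i l ih =>
          intro hmem
          rw [List.foldl_cons]
          rcases List.mem_cons.mp hmem with rfl | hmem'
          · rcases h : stepI none ((p : Nat) : Int) with _ | r
            · exact absurd h hAinner
            · rw [foldl_some_fix stepI hfix l r]; simp
          · rcases h : stepI none i with _ | r
            · exact ih hmem'
            · rw [foldl_some_fix stepI hfix l r]; simp
    exact hgen _ hpmem
  -- and has the shape some [i, j] with i, j from the ranges (hence ≥ 0)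
  have hshape : ∀ (l : List Int), (∀ x ∈ l, 0 ≤ x) →
      (l.foldl stepI none = none ∨
        ∃ i j : Int, 0 ≤ i ∧ 0 ≤ j ∧ l.foldl stepI none = some [i, j]) := by
    intro l hl
    induction l with
    | nil => exact Or.inl rfl
    | cons i l ih =>
        rw [List.foldl_cons]
        rcases h : stepI none i with _ | r
        · exact ih (fun x hx => hl x (by simp [hx]))
        · rw [foldl_some_fix stepI hfix l r]
          -- r comes from the inner first-match fold: r = [i, j] with j in the column range
          rw [hstepI] at h
          dsimp only at h
          rcases foldl_match_shape
              (fun j => PySem.Dict.getD d (i, j) frDflt == [none, none, none, none])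
              (fun j => [i, j]) _ with h0 | ⟨j, hj, h0⟩
          · rw [h0] at h; cases h
          · rw [h0] at h
            injection h with h
            rw [PySem.List.mem_pyRange_one] at hj
            exact Or.inr ⟨i, j, hl i (by simp), by omega, by rw [← h]⟩
  rcases hshape (PySem.List.pyRange 0 (matrix.length : Int) 1)
      (fun x hx => ((PySem.List.mem_pyRange_one).mp hx).1) with h | ⟨i, j, hi0, hj0, h⟩
  · exact absurd h houter_ne
  · rw [h]
    show ¬ ([i, j] = [-1, -1])
    intro hcontra
    injection hcontra with h1 _
    omega
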